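-- pv_equiv track=rewrite | github.com/paiml/depyler | examples/hard_final_db_bufferpool.py | clock_evict
-- ===== SOURCE A (Python) =====
-- def clock_evict(page_ids: list[int], pin_counts: list[int], ref_bits: list[int], clock_hand: int) -> int:
--     """Clock algorithm eviction. Returns frame to evict, -1 if all pinned."""
--     n: int = len(page_ids)
--     scanned: int = 0
--     hand: int = clock_hand
--     while scanned < n * 2:
--         frame: int = hand % n
--         pc: int = pin_counts[frame]
--         if pc == 0:
--             rb: int = ref_bits[frame]
--             if rb == 0:
--                 return frame
--             else:
--                 ref_bits[frame] = 0
--         hand = hand + 1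
--         scanned = scanned + 1
--     return 0 - 1
-- ===== SOURCE B (Python) =====
-- def clock_evict(page_ids: list[int], pin_counts: list[int], ref_bits: list[int], clock_hand: int) -> int:
--     """Clock eviction restructured: precompute the unpinned frames in rotation
--     order once, then scan that list -- return the first with a clear reference
--     bit, clearing bits along the way; fall back to the head of the list (the
--     first unpinned frame), since after a full sweep every reference bit is
--     clear.  Same ref_bits mutation as the original up to the point of return."""
--     n = len(page_ids)
--     unpinned = [f for f in ((clock_hand + i) % n for i in range(n)) if pin_counts[f] == 0]
--     for f in unpinned:
--         if ref_bits[f] == 0: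
--             return f
--         ref_bits[f] = 0
--     return unpinned[0] if unpinned else -1
-- ===== Notes on version B (the rewrite author's own statement) =====
-- stated objective: simpler
-- what changed: Replaced the two-revolution clock scan over a running hand counter by precomputing the list of unpinned frames in rotation order and scanning it once, with its head as the all-bits-set fallback (A's second revolution merely returns the first unpinned frame after all bits were cleared).
-- outside the precondition, e.g. on clock_evict([1, 2], [0], [0, 0], 0): A returns 0, B raises IndexError
import Mathlib
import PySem

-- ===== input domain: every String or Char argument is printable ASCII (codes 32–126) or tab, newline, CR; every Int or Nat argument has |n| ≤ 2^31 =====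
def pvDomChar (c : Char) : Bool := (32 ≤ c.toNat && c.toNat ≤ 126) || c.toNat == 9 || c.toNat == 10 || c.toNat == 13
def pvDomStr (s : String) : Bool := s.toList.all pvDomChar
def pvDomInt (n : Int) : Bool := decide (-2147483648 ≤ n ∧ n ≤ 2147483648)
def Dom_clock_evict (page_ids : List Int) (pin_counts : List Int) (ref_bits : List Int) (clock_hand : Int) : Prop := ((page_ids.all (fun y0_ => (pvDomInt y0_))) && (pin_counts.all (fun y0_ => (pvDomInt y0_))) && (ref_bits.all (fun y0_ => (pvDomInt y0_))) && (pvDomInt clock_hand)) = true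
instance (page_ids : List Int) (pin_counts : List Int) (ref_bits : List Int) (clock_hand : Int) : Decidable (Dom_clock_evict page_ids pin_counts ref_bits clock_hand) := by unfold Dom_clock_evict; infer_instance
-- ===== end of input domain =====

-- B replaces A's two-revolution clock scan by one pass over the precomputed list of
-- unpinned frames in rotation order (objective: simpler). Both mutate ref_bits
-- identically in Python; the theorems below are about the return value.

-- ===== PORT A =====
-- while-loop of A: fuel = 2*n - scanned; state (ref_bits, hand)
def clockA (pin : List Int) (n : Int) (rb : List Int) (hand : Int) : Nat → Int
  | 0 => -1
  | Nat.succ k =>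
    let frame := PySem.Int.mod hand n
    let pc := PySem.List.pyGetD pin frame 0
    if pc = 0 then
      let r := PySem.List.pyGetD rb frame 0
      if r = 0 then frame
      else clockA pin n (PySem.List.pySetD rb frame 0) (hand + 1) k
    else clockA pin n rb (hand + 1) k

def clock_evict (page_ids : List Int) (pin_counts : List Int) (ref_bits : List Int) (clock_hand : Int) : Int :=
  clockA pin_counts (page_ids.length : Int) ref_bits clock_hand (2 * page_ids.length)

-- ===== PORT B =====
-- B's for-loop over the precomputed unpinned list: returns some f at `return f`,
-- none when it falls through to the fallback; state = ref_bits
def scanB : List Int → List Int → Option Int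
  | _, [] => none
  | rb, f :: rest =>
    if PySem.List.pyGetD rb f 0 = 0 then some f
    else scanB (PySem.List.pySetD rb f 0) rest

-- the comprehension building the unpinned list in rotation order
def unpinnedB (pin : List Int) (hand0 n : Int) : List Int :=
  ((PySem.List.pyRange 0 n 1).map (fun i => PySem.Int.mod (hand0 + i) n)).filter
    (fun f => PySem.List.pyGetD pin f 0 == 0)

def clock_evict_alt (page_ids : List Int) (pin_counts : List Int) (ref_bits : List Int) (clock_hand : Int) : Int :=
  match scanB ref_bits (unpinnedB pin_counts clock_hand (page_ids.length : Int)) with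
  | some f => f
  | none => match unpinnedB pin_counts clock_hand (page_ids.length : Int) with
            | [] => -1
            | f :: _ => f

-- ===== PRECONDITION & SPEC =====
-- Pre_ excludes mismatched parallel arrays on which A can raise IndexError: pin_counts
-- shorter than page_ids (there A can also return early by luck of the rotation, where
-- B's up-front filtering pass raises), or ref_bits shorter when some frame is unpinned
-- (when every frame is pinned A never reads ref_bits and returns -1, so that corner stays inside).
def Pre_clock_evict (page_ids : List Int) (pin_counts : List Int) (ref_bits : List Int) (clock_hand : Int) : Prop :=
  page_ids.length ≤ pin_counts.length ∧
    (page_ids.length ≤ ref_bits.length ∨ ∀ f ∈ pin_counts.take page_ids.length, f ≠ 0)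

instance (page_ids : List Int) (pin_counts : List Int) (ref_bits : List Int) (clock_hand : Int) : Decidable (Pre_clock_evict page_ids pin_counts ref_bits clock_hand) := by unfold Pre_clock_evict; infer_instance

def pvWitness_clock_evict : List Int × List Int × List Int × Int := ([7, 8, 9], [0, 1, 0], [1, 0, 1], 1)

def Spec_clock_evict (page_ids : List Int) (pin_counts : List Int) (ref_bits : List Int) (clock_hand : Int) (out : Int) : Prop := out = clock_evict_alt page_ids pin_counts ref_bits clock_hand
instance (page_ids : List Int) (pin_counts : List Int) (ref_bits : List Int) (clock_hand : Int) (out : Int) : Decidable (Spec_clock_evict page_ids pin_counts ref_bits clock_hand out) := by unfold Spec_clock_evict; infer_instance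

-- ===== CLAIM (what is proved, stated in full; the proofs are below) =====
def Claim_equal_clock_evict : Prop := ∀ (page_ids : List Int) (pin_counts : List Int) (ref_bits : List Int) (clock_hand : Int), Dom_clock_evict page_ids pin_counts ref_bits clock_hand → Pre_clock_evict page_ids pin_counts ref_bits clock_hand → Spec_clock_evict page_ids pin_counts ref_bits clock_hand (clock_evict page_ids pin_counts ref_bits clock_hand)

-- ===== LEMMAS AND PROOFS =====

-- the frame probed at step j of the rotation
def pvFrame (hand0 n : Int) (j : Nat) : Int := PySem.Int.mod (hand0 + (j : Int)) n

-- first frame from step m on (fuel k) that is unpinned AND has a clear ORIGINAL ref bit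
def pvFind (pin rb0 : List Int) (hand0 n : Int) : Nat → Nat → Option Int
  | _, 0 => none
  | m, Nat.succ k =>
    if PySem.List.pyGetD pin (pvFrame hand0 n m) 0 = 0 ∧
       PySem.List.pyGetD rb0 (pvFrame hand0 n m) 0 = 0 then some (pvFrame hand0 n m)
    else pvFind pin rb0 hand0 n (m + 1) k

-- first unpinned frame from step m on, fuel k (A's second revolution)
def pvFw (pin : List Int) (n hand0 : Int) : Nat → Nat → Int
  | _, 0 => -1
  | m, Nat.succ k =>
    if PySem.List.pyGetD pin (pvFrame hand0 n m) 0 = 0 then pvFrame hand0 n m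
    else pvFw pin n hand0 (m + 1) k

theorem pvFrame_nonneg (hand0 : Int) (n : Int) (hn : 0 < n) (j : Nat) : 0 ≤ pvFrame hand0 n j :=
  PySem.Int.mod_nonneg _ hn

theorem pvFrame_lt (hand0 : Int) (n : Int) (hn : 0 < n) (j : Nat) : pvFrame hand0 n j < n :=
  PySem.Int.mod_lt _ hn

theorem pvFrame_ne (hand0 : Int) (n : Nat) (hn : 0 < n) {i j : Nat} (hij : i ≠ j)
    (hi : i < n) (hj : j < n) : pvFrame hand0 (n : Int) i ≠ pvFrame hand0 (n : Int) j := by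
  have hn' : (0:Int) < (n:Int) := by exact_mod_cast hn
  simp only [pvFrame, PySem.Int.mod_eq_emod_of_pos (h := hn')]
  intro h
  have h0 : ((hand0 + (i:Int)) - (hand0 + (j:Int))) % (n:Int) = 0 :=
    Int.emod_eq_emod_iff_emod_sub_eq_zero.mp h
  have hd : (n:Int) ∣ ((i:Int) - (j:Int)) := by
    have := Int.dvd_of_emod_eq_zero h0
    simpa [sub_eq_iff_eq_add] using (by simpa using this : (n:Int) ∣ ((i:Int) - (j:Int)))
  rcases lt_or_gt_of_ne (fun hc : (i:Int) = (j:Int) => hij (by exact_mod_cast hc)) with hlt | hgt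
  · have := Int.le_of_dvd (by omega) (dvd_neg.mpr hd)
    omega
  · have := Int.le_of_dvd (by omega) hd
    omega

theorem pv_getD_setD_self (xs : List Int) (a : Int) (v : Int) (ha : 0 ≤ a) (ha2 : a < (xs.length : Int)) :
    PySem.List.pyGetD (PySem.List.pySetD xs a v) a 0 = v := by
  have hlt : a.toNat < xs.length := by omega
  rw [PySem.List.pySetD_of_nonneg (h := ha),
      PySem.List.pyGetD_eq_getElem (h0 := ha) (h1 := by simpa using ha2)]
  simp

theorem pv_getD_setD_ne (xs : List Int) (a b : Int) (v : Int) (ha : 0 ≤ a) (hb : 0 ≤ b)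
    (hb2 : b < (xs.length : Int)) (hab : a ≠ b) :
    PySem.List.pyGetD (PySem.List.pySetD xs a v) b 0 = PySem.List.pyGetD xs b 0 := by
  rw [PySem.List.pySetD_of_nonneg (h := ha),
      PySem.List.pyGetD_eq_getElem (h0 := hb) (h1 := by simpa using hb2),
      PySem.List.pyGetD_eq_getElem (h0 := hb) (h1 := by simpa using hb2)]
  have hne : a.toNat ≠ b.toNat := by omega
  simp [hne]

-- A's second revolution returns pvFw
theorem pv_sweep2 (pin : List Int) (hand0 : Int) (n : Nat) (hn : 0 < n)
    (rb : List Int)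
    (hclr : ∀ j : Nat, j < n → PySem.List.pyGetD pin (pvFrame hand0 (n : Int) j) 0 = 0 →
      PySem.List.pyGetD rb (pvFrame hand0 (n : Int) j) 0 = 0) :
    ∀ (k m : Nat), m + k = n →
      clockA pin (n : Int) rb (hand0 + ((n : Int) + (m : Int))) k = pvFw pin (n : Int) hand0 m k := by
  have hn' : (0:Int) < (n:Int) := by exact_mod_cast hn
  intro k
  induction k with
  | zero => intro m hmk; simp [clockA, pvFw]
  | succ k ih =>
    intro m hmk
    have hm : m < n := by omega
    have hframe : PySem.Int.mod (hand0 + ((n:Int) + (m:Int))) (n:Int) = pvFrame hand0 (n:Int) m := by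
      have harg : hand0 + ((n:Int) + (m:Int)) = (hand0 + (m:Int)) + (n:Int) := by ring
      simp only [pvFrame, PySem.Int.mod_eq_emod_of_pos (h := hn'), harg, Int.add_emod_right]
    simp only [clockA, pvFw, hframe]
    by_cases hp : PySem.List.pyGetD pin (pvFrame hand0 (n:Int) m) 0 = 0
    · have hr := hclr m hm hp
      simp [hp, hr]
    · simp only [hp, if_false]
      have harg : hand0 + ((n:Int) + (m:Int)) + 1 = hand0 + ((n:Int) + (((m+1 : Nat)):Int)) := by
        push_cast; ring
      rw [harg]
      exact ih (m+1) (by omega)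

-- A's first revolution from step i: the first unpinned-and-clear frame if any,
-- else fall through to the second revolution (pvFw from step 0)
theorem pv_mainA (pin rb0 : List Int) (hand0 : Int) (n : Nat) (hn : 0 < n)
    (hrb0 : n ≤ rb0.length) :
    ∀ (k i : Nat) (rb : List Int), i + k = n →
      rb.length = rb0.length →
      (∀ j : Nat, i ≤ j → j < n →
        PySem.List.pyGetD rb (pvFrame hand0 (n : Int) j) 0 = PySem.List.pyGetD rb0 (pvFrame hand0 (n : Int) j) 0) →
      (∀ j : Nat, j < i → PySem.List.pyGetD pin (pvFrame hand0 (n : Int) j) 0 = 0 →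
        PySem.List.pyGetD rb (pvFrame hand0 (n : Int) j) 0 = 0) →
      clockA pin (n : Int) rb (hand0 + (i : Int)) (k + n) =
        (pvFind pin rb0 hand0 (n : Int) i k).getD (pvFw pin (n : Int) hand0 0 n) := by
  have hn' : (0:Int) < (n:Int) := by exact_mod_cast hn
  intro k
  induction k with
  | zero =>
    intro i rb hik hlen hunt hclr
    have hi : i = n := by omega
    subst hi
    simp only [pvFind, Option.getD, Nat.zero_add]
    have hs2 := pv_sweep2 pin hand0 i hn rb hclr i 0 (by omega)
    have harg : hand0 + ((i:Int) + ((0:Nat):Int)) = hand0 + (i:Int) := by push_cast; ring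
    rw [harg] at hs2
    exact hs2
  | succ k ih =>
    intro i rb hik hlen hunt hclr
    have hi : i < n := by omega
    have hfuel : (k + 1) + n = (k + n) + 1 := by omega
    rw [hfuel]
    have hFi : PySem.Int.mod (hand0 + (i:Int)) (n:Int) = pvFrame hand0 (n:Int) i := rfl
    have hFnn : 0 ≤ pvFrame hand0 (n:Int) i := pvFrame_nonneg hand0 (n:Int) hn' i
    have hFrb : pvFrame hand0 (n:Int) i < (rb.length : Int) := by
      have : (n:Int) ≤ (rb.length : Int) := by exact_mod_cast (hlen ▸ hrb0)
      have := pvFrame_lt hand0 (n:Int) hn' i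
      omega
    have hstep : hand0 + (i:Int) + 1 = hand0 + (((i+1 : Nat)):Int) := by push_cast; ring
    simp only [clockA, pvFind, hFi]
    by_cases hp : PySem.List.pyGetD pin (pvFrame hand0 (n:Int) i) 0 = 0
    · have hr : PySem.List.pyGetD rb (pvFrame hand0 (n:Int) i) 0
          = PySem.List.pyGetD rb0 (pvFrame hand0 (n:Int) i) 0 := hunt i (le_refl i) hi
      by_cases hr0 : PySem.List.pyGetD rb0 (pvFrame hand0 (n:Int) i) 0 = 0
      · simp [hp, hr, hr0]
      · have hrne : ¬ PySem.List.pyGetD rb (pvFrame hand0 (n:Int) i) 0 = 0 := by rw [hr]; exact hr0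
        simp only [hp, hrne, hr0, if_true, if_false, true_and]
        rw [hstep]
        refine ih (i+1) (PySem.List.pySetD rb (pvFrame hand0 (n:Int) i) 0) (by omega)
          (by simp [hlen]) ?_ ?_
        · intro j hij hjn
          rw [pv_getD_setD_ne rb _ _ 0 hFnn (pvFrame_nonneg hand0 (n:Int) hn' j)
            (by have : (n:Int) ≤ (rb.length : Int) := by exact_mod_cast (hlen ▸ hrb0)
                have := pvFrame_lt hand0 (n:Int) hn' j
                omega)
            (pvFrame_ne hand0 n hn (by omega) hi hjn)]
          exact hunt j (by omega) hjn
        · intro j hj hpj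
          by_cases hji : j = i
          · subst hji
            exact pv_getD_setD_self rb _ 0 hFnn hFrb
          · rw [pv_getD_setD_ne rb _ _ 0 hFnn (pvFrame_nonneg hand0 (n:Int) hn' j)
              (by have : (n:Int) ≤ (rb.length : Int) := by exact_mod_cast (hlen ▸ hrb0)
                  have := pvFrame_lt hand0 (n:Int) hn' j
                  omega)
              (pvFrame_ne hand0 n hn (fun h => hji h.symm) hi (by omega))]
            exact hclr j (by omega) hpj
    · simp only [hp, if_false, false_and]
      rw [hstep]
      refine ih (i+1) rb (by omega) hlen
        (fun j hij hjn => hunt j (by omega) hjn) ?_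
      intro j hj hpj
      by_cases hji : j = i
      · subst hji; exact absurd hpj hp
      · exact hclr j (by omega) hpj

-- the unpinned frames among steps [m, m+k)
def pvUnp (pin : List Int) (hand0 n : Int) (m k : Nat) : List Int :=
  ((List.range' m k).map (fun j => pvFrame hand0 n j)).filter
    (fun f => PySem.List.pyGetD pin f 0 == 0)

-- B's scan over the unpinned list computes pvFind
theorem pv_scanB (pin rb0 : List Int) (hand0 : Int) (n : Nat) (hn : 0 < n)
    (hrb0 : n ≤ rb0.length) :
    ∀ (k m : Nat) (rb : List Int), m + k = n →
      rb.length = rb0.length →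
      (∀ j : Nat, m ≤ j → j < n →
        PySem.List.pyGetD rb (pvFrame hand0 (n : Int) j) 0 = PySem.List.pyGetD rb0 (pvFrame hand0 (n : Int) j) 0) →
      scanB rb (pvUnp pin hand0 (n : Int) m k) = pvFind pin rb0 hand0 (n : Int) m k := by
  have hn' : (0:Int) < (n:Int) := by exact_mod_cast hn
  intro k
  induction k with
  | zero => intro m rb _ _ _; simp [pvUnp, scanB, pvFind]
  | succ k ih =>
    intro m rb hmk hlen hunt
    have hm : m < n := by omega
    simp only [pvUnp, List.range'_succ, List.map_cons, List.filter_cons]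
    by_cases hp : PySem.List.pyGetD pin (pvFrame hand0 (n:Int) m) 0 = 0
    · have hpb : (PySem.List.pyGetD pin (pvFrame hand0 (n:Int) m) 0 == 0) = true := by
        simp [hp]
      rw [if_pos hpb]
      have hr : PySem.List.pyGetD rb (pvFrame hand0 (n:Int) m) 0
          = PySem.List.pyGetD rb0 (pvFrame hand0 (n:Int) m) 0 := hunt m (le_refl m) hm
      by_cases hr0 : PySem.List.pyGetD rb0 (pvFrame hand0 (n:Int) m) 0 = 0
      · simp [scanB, pvFind, hp, hr, hr0]
      · have hrne : ¬ PySem.List.pyGetD rb (pvFrame hand0 (n:Int) m) 0 = 0 := by rw [hr]; exact hr0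
        simp only [scanB, pvFind, hp, hrne, hr0, if_false, true_and]
        refine ih (m+1) (PySem.List.pySetD rb (pvFrame hand0 (n:Int) m) 0) (by omega)
          (by simp [hlen]) ?_
        intro j hij hjn
        have hFnn : 0 ≤ pvFrame hand0 (n:Int) m := pvFrame_nonneg hand0 (n:Int) hn' m
        rw [pv_getD_setD_ne rb _ _ 0 hFnn (pvFrame_nonneg hand0 (n:Int) hn' j)
          (by have : (n:Int) ≤ (rb.length : Int) := by exact_mod_cast (hlen ▸ hrb0)
              have := pvFrame_lt hand0 (n:Int) hn' j
              omega)
          (pvFrame_ne hand0 n hn (by omega) hm hjn)]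
        exact hunt j (by omega) hjn
    · have hpb : ¬ ((PySem.List.pyGetD pin (pvFrame hand0 (n:Int) m) 0 == 0) = true) := by
        simp [hp]
      rw [if_neg hpb]
      simp only [pvFind, hp, if_false, false_and]
      exact ih (m+1) rb (by omega) hlen (fun j hij hjn => hunt j (by omega) hjn)

-- B's fallback (head of the unpinned list, -1 if none) is A's second revolution
theorem pv_head (pin : List Int) (hand0 : Int) (n : Nat) :
    ∀ (k m : Nat),
      (match pvUnp pin hand0 (n : Int) m k with | [] => (-1 : Int) | f :: _ => f)
        = pvFw pin (n : Int) hand0 m k := by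
  intro k
  induction k with
  | zero => intro m; simp [pvUnp, pvFw]
  | succ k ih =>
    intro m
    simp only [pvUnp, List.range'_succ, List.map_cons, List.filter_cons]
    by_cases hp : PySem.List.pyGetD pin (pvFrame hand0 (n:Int) m) 0 = 0
    · simp [hp, pvFw]
    · have hpb : ¬ ((PySem.List.pyGetD pin (pvFrame hand0 (n:Int) m) 0 == 0) = true) := by
        simp [hp]
      rw [if_neg hpb]
      simp only [pvFw, if_neg hp]
      exact ih (m+1)

-- the port's comprehension is pvUnp over the whole revolution
theorem pv_unp_eq (pin : List Int) (hand0 : Int) (n : Nat) :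
    unpinnedB pin hand0 (n : Int) = pvUnp pin hand0 (n : Int) 0 n := by
  unfold unpinnedB
  rw [PySem.List.pyRange_zero_natCast]
  simp [pvUnp, pvFrame, List.map_map, List.range_eq_range', Function.comp_def]

-- when every frame is pinned, A's loop never fires its body and returns -1
theorem pv_allpinned_A (pin : List Int) (n : Nat) (hn : 0 < n)
    (hall : ∀ f : Int, 0 ≤ f → f < (n : Int) → PySem.List.pyGetD pin f 0 ≠ 0) :
    ∀ (k : Nat) (rb : List Int) (hand : Int), clockA pin (n : Int) rb hand k = -1 := by
  have hn' : (0:Int) < (n:Int) := by exact_mod_cast hn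
  intro k
  induction k with
  | zero => intro rb hand; simp [clockA]
  | succ k ih =>
    intro rb hand
    have hp := hall (PySem.Int.mod hand (n:Int)) (PySem.Int.mod_nonneg _ hn') (PySem.Int.mod_lt _ hn')
    simp only [clockA, if_neg hp]
    exact ih rb (hand + 1)

-- when every frame is pinned, B's unpinned list is empty
theorem pv_allpinned_B (pin : List Int) (hand0 : Int) (n : Nat) (hn : 0 < n)
    (hall : ∀ f : Int, 0 ≤ f → f < (n : Int) → PySem.List.pyGetD pin f 0 ≠ 0) :
    unpinnedB pin hand0 (n : Int) = [] := by
  have hn' : (0:Int) < (n:Int) := by exact_mod_cast hn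
  unfold unpinnedB
  rw [List.filter_eq_nil_iff]
  intro f hf
  simp only [List.mem_map] at hf
  obtain ⟨i, _, rfl⟩ := hf
  simpa using hall _ (PySem.Int.mod_nonneg _ hn') (PySem.Int.mod_lt _ hn')

-- a pinned-take hypothesis says every in-range probe of pin_counts is nonzero
theorem pv_take_all (pin : List Int) (n : Nat) (hlen : n ≤ pin.length)
    (h : ∀ f ∈ pin.take n, f ≠ 0) :
    ∀ f : Int, 0 ≤ f → f < (n : Int) → PySem.List.pyGetD pin f 0 ≠ 0 := by
  intro f hf0 hfn
  have hflt : f.toNat < n := by omega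
  have hlt : f.toNat < pin.length := by omega
  rw [PySem.List.pyGetD_eq_getElem (h0 := hf0) (h1 := by exact_mod_cast (by omega : f < (pin.length : Int)))]
  refine h _ ?_
  rw [show pin[f.toNat] = (pin.take n)[f.toNat]'(by simpa using ⟨hflt, hlt⟩) from (List.getElem_take).symm]
  exact List.getElem_mem _
-- ===== VERDICT (by name: the statement is the Claim_ definition above) =====
theorem clock_evict_spec : Claim_equal_clock_evict := by
  intro page_ids pin_counts ref_bits clock_hand _hdom hpre
  obtain ⟨h1, h2⟩ := hpre
  unfold Spec_clock_evict clock_evict clock_evict_alt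
  rcases Nat.eq_zero_or_pos page_ids.length with hn0 | hn
  · simp [hn0, clockA, scanB, unpinnedB, PySem.List.pyRange_one_eq_nil]
  rcases h2 with h2 | h2
  case inr.inr =>
    have hall := pv_take_all pin_counts page_ids.length h1 h2
    rw [pv_allpinned_A pin_counts page_ids.length hn hall _ ref_bits clock_hand,
        pv_allpinned_B pin_counts clock_hand page_ids.length hn hall]
    simp [scanB]
  case inr.inl =>
    rw [pv_unp_eq pin_counts clock_hand page_ids.length,
        pv_scanB pin_counts ref_bits clock_hand page_ids.length hn h2 page_ids.length 0 ref_bits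
          (by omega) rfl (fun j _ _ => rfl)]
    have hmain := pv_mainA pin_counts ref_bits clock_hand page_ids.length hn h2
      page_ids.length 0 ref_bits (by omega) rfl
      (fun j _ _ => rfl)
      (fun j hj _ => absurd hj (by omega))
    simp only [Nat.cast_zero, add_zero] at hmain
    have hfuel : 2 * page_ids.length = page_ids.length + page_ids.length := by omega
    rw [hfuel, hmain]
    cases hF : pvFind pin_counts ref_bits clock_hand (page_ids.length : Int) 0 page_ids.length with
    | some f => simp
    | none => simp only [Option.getD]; exact (pv_head pin_counts clock_hand page_ids.length page_ids.length 0).symm
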